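-- pv_equiv track=rewrite | github.com/JasonLai42/Stepik | Chapter 5/5.10.2/local_alignment.py | find_alignment
-- ===== SOURCE A (Python) =====
-- def find_alignment(indel_penalty, PAM250, score_matrix, v, w, i, j, new_v, new_w):
--     # We find start of local alignment if we hit a node where the score is 0 (we can take a free ride from source to this node)
--     if (i == 0 and j == 0) or score_matrix[(i, j)] == 0:
--         return new_v, new_w
--     else:
--         if i == 0:
--             return find_alignment(indel_penalty, PAM250, score_matrix, v, w, i, j - 1, '-' + new_v, w[j-1] + new_w)
--         elif j == 0:
--             return find_alignment(indel_penalty, PAM250, score_matrix, v, w, i - 1, j, v[i-1] + new_v, '-' + new_w)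
--         else:
--             if score_matrix[(i, j)] - indel_penalty == score_matrix[(i - 1, j)]:
--                 return find_alignment(indel_penalty, PAM250, score_matrix, v, w, i - 1, j, v[i-1] + new_v, '-' + new_w)
--             elif score_matrix[(i, j)] - indel_penalty == score_matrix[(i, j - 1)]:
--                 return find_alignment(indel_penalty, PAM250, score_matrix, v, w, i, j - 1, '-' + new_v, w[j-1] + new_w)
--             else:
--                 return find_alignment(indel_penalty, PAM250, score_matrix, v, w, i - 1, j - 1, v[i-1] + new_v, w[j-1] + new_w)
-- ===== SOURCE B (Python) =====
-- def find_alignment(indel_penalty, PAM250, score_matrix, v, w, i, j, new_v, new_w):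
--     # Phase 1: walk back recording only the trail of visited nodes.
--     trail = [(i, j)]
--     while not ((i == 0 and j == 0) or score_matrix[(i, j)] == 0):
--         if i == 0:
--             j -= 1
--         elif j == 0:
--             i -= 1
--         elif score_matrix[(i, j)] - indel_penalty == score_matrix[(i - 1, j)]:
--             i -= 1
--         elif score_matrix[(i, j)] - indel_penalty == score_matrix[(i, j - 1)]:
--             j -= 1
--         else:
--             i, j = i - 1, j - 1
--         trail.append((i, j))
--     # Phase 2: one aligned column per trail edge, deepest edge first,
--     # reconstructed purely from the coordinates of the edge's endpoints.
--     rt = trail[::-1]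
--     cols = [_column(v, w, c, p) for p, c in zip(rt, rt[1:])]
--     return ''.join(a for a, _ in cols) + new_v, ''.join(b for _, b in cols) + new_w
--
-- def _column(v, w, child, pred):
--     ci, cj = child
--     if pred[0] == ci:
--         return '-', w[cj - 1]
--     if pred[1] == cj:
--         return v[ci - 1], '-'
--     return v[ci - 1], w[cj - 1]
-- ===== Notes on version B (the rewrite author's own statement) =====
-- stated objective: alternative
-- what changed: Splits the recursive string-prepending backtrack into two phases: an iterative walk that records only the trail of (i,j) nodes, then a second pass that reconstructs each aligned column purely from the coordinates of a trail edge and joins once, instead of carrying and copying both strings through every recursive call.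
import Mathlib
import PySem

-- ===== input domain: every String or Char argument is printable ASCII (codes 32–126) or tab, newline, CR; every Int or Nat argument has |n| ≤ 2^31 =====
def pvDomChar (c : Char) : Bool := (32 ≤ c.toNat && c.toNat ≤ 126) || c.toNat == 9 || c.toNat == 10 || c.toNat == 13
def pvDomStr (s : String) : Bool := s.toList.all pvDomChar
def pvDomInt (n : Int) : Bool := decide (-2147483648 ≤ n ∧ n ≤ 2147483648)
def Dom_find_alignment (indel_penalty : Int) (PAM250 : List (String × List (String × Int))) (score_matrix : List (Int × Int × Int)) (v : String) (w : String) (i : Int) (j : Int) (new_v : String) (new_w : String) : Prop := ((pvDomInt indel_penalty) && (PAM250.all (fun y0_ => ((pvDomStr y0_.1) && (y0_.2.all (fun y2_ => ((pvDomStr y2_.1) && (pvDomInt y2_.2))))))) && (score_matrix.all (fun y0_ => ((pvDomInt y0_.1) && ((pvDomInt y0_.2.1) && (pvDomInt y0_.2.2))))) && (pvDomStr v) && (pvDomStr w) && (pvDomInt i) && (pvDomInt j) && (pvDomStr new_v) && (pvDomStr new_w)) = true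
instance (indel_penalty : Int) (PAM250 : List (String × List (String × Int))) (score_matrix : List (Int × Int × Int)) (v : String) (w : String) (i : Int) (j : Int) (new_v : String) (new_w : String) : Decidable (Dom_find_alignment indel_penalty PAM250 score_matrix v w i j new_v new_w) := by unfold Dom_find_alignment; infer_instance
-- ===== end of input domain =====

-- B replaces A's recursive string-prepending backtrack by a two-phase algorithm:
-- record the trail of (i,j) nodes, then rebuild the aligned columns from the
-- trail's edges and join once (objective: alternative).

-- shared primitive helpers (dict lookup by (i,j) key; Python string index s[k-1]):
def pvLk (sm : List (Int × Int × Int)) (a b : Int) : Option Int :=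
  match sm with
  | [] => none
  | (x, y, s) :: t => if x = a ∧ y = b then some s else pvLk t a b

-- score_matrix[(a,b)] with a default of 0 where Python raises KeyError (such inputs are outside Pre_)
def pvLkD (sm : List (Int × Int × Int)) (a b : Int) : Int := (pvLk sm a b).getD 0

-- s[k-1] with a default where Python raises IndexError (outside Pre_); negative wraparound is Python-exact
def pvCh (s : String) (k : Int) : Char := (PySem.Str.pyGet? s (k - 1)).getD ' '

-- ===== PORT A =====
-- literal transliteration of A's recursion; fuel only makes it total (sufficient on Pre_)
def pvGoA (fuel : Nat) (p : Int) (sm : List (Int × Int × Int)) (v w : String)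
    (i j : Int) (nv nw : List Char) : List Char × List Char :=
  match fuel with
  | 0 => (nv, nw)
  | f + 1 =>
    if (i = 0 ∧ j = 0) ∨ pvLkD sm i j = 0 then (nv, nw)
    else if i = 0 then pvGoA f p sm v w i (j - 1) ('-' :: nv) (pvCh w j :: nw)
    else if j = 0 then pvGoA f p sm v w (i - 1) j (pvCh v i :: nv) ('-' :: nw)
    else if pvLkD sm i j - p = pvLkD sm (i - 1) j then
      pvGoA f p sm v w (i - 1) j (pvCh v i :: nv) ('-' :: nw)
    else if pvLkD sm i j - p = pvLkD sm i (j - 1) then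
      pvGoA f p sm v w i (j - 1) ('-' :: nv) (pvCh w j :: nw)
    else pvGoA f p sm v w (i - 1) (j - 1) (pvCh v i :: nv) (pvCh w j :: nw)

def find_alignment (indel_penalty : Int) (PAM250 : List (String × List (String × Int))) (score_matrix : List (Int × Int × Int)) (v : String) (w : String) (i : Int) (j : Int) (new_v : String) (new_w : String) : String × String :=
  let r := pvGoA (i.toNat + j.toNat + 1) indel_penalty score_matrix v w i j new_v.toList new_w.toList
  (String.mk r.1, String.mk r.2)

-- ===== PORT B =====
-- Phase 1 of Source B: the trail of visited nodes, current node first (no strings carried).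
def pvTrail (fuel : Nat) (p : Int) (sm : List (Int × Int × Int)) (i j : Int) : List (Int × Int) :=
  match fuel with
  | 0 => [(i, j)]
  | f + 1 =>
    if (i = 0 ∧ j = 0) ∨ pvLkD sm i j = 0 then [(i, j)]
    else (i, j) ::
      (if i = 0 then pvTrail f p sm i (j - 1)
       else if j = 0 then pvTrail f p sm (i - 1) j
       else if pvLkD sm i j - p = pvLkD sm (i - 1) j then pvTrail f p sm (i - 1) j
       else if pvLkD sm i j - p = pvLkD sm i (j - 1) then pvTrail f p sm i (j - 1)
       else pvTrail f p sm (i - 1) (j - 1))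

-- Source B's _column: the aligned pair of one edge, read off its endpoints' coordinates
def pvColumn (v w : String) (c p : Int × Int) : Char × Char :=
  if p.1 = c.1 then ('-', pvCh w c.2)
  else if p.2 = c.2 then (pvCh v c.1, '-')
  else (pvCh v c.1, pvCh w c.2)

-- Phase 2 of Source B: columns of consecutive (pred, child) pairs of the reversed trail
def pvCols (v w : String) : List (Int × Int) → List (Char × Char)
  | p :: c :: rest => pvColumn v w c p :: pvCols v w (c :: rest)
  | _ => []

def find_alignment_alt (indel_penalty : Int) (PAM250 : List (String × List (String × Int))) (score_matrix : List (Int × Int × Int)) (v : String) (w : String) (i : Int) (j : Int) (new_v : String) (new_w : String) : String × String :=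
  let cols := pvCols v w (pvTrail (i.toNat + j.toNat + 1) indel_penalty score_matrix i j).reverse
  (String.mk (cols.map Prod.fst ++ new_v.toList), String.mk (cols.map Prod.snd ++ new_w.toList))

-- ===== PRECONDITION & SPEC =====
-- Pre_ is the natural domain of a backtrack call: either the call stops immediately
-- (start node, or a recorded score of 0 at (i,j)), or score_matrix is a DP table
-- defined on the whole rectangle [0..i]×[0..j] (the source (0,0) is never read) with
-- i, j inside the string lengths — the shape the DP caller always supplies.  On a
-- table with holes A raises KeyError/IndexError or returns depending on which holes
-- its particular path happens to dodge; such inputs are outside Pre_ (see cites).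
def Pre_find_alignment (indel_penalty : Int) (PAM250 : List (String × List (String × Int))) (score_matrix : List (Int × Int × Int)) (v : String) (w : String) (i : Int) (j : Int) (new_v : String) (new_w : String) : Prop :=
  (i = 0 ∧ j = 0) ∨ pvLk score_matrix i j = some 0 ∨
  (0 ≤ i ∧ 0 ≤ j ∧ i ≤ (v.toList.length : Int) ∧ j ≤ (w.toList.length : Int) ∧
   ∀ a ∈ List.range (i.toNat + 1), ∀ b ∈ List.range (j.toNat + 1),
     ¬(a = 0 ∧ b = 0) → (pvLk score_matrix (a : Int) (b : Int)).isSome)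
instance (indel_penalty : Int) (PAM250 : List (String × List (String × Int))) (score_matrix : List (Int × Int × Int)) (v : String) (w : String) (i : Int) (j : Int) (new_v : String) (new_w : String) : Decidable (Pre_find_alignment indel_penalty PAM250 score_matrix v w i j new_v new_w) := by unfold Pre_find_alignment; infer_instance

def pvWitness_find_alignment : Int × (List (String × List (String × Int))) × (List (Int × Int × Int)) × String × String × Int × Int × String × String :=
  (3, [], [(1, 1, 10), (0, 1, 7), (1, 0, 1)], "A", "C", 1, 1, "", "")

def Spec_find_alignment (indel_penalty : Int) (PAM250 : List (String × List (String × Int))) (score_matrix : List (Int × Int × Int)) (v : String) (w : String) (i : Int) (j : Int) (new_v : String) (new_w : String) (out : String × String) : Prop := out = find_alignment_alt indel_penalty PAM250 score_matrix v w i j new_v new_w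
instance (indel_penalty : Int) (PAM250 : List (String × List (String × Int))) (score_matrix : List (Int × Int × Int)) (v : String) (w : String) (i : Int) (j : Int) (new_v : String) (new_w : String) (out : String × String) : Decidable (Spec_find_alignment indel_penalty PAM250 score_matrix v w i j new_v new_w out) := by unfold Spec_find_alignment; infer_instance

-- ===== CLAIM (what is proved, stated in full; the proofs are below) =====
def Claim_equal_find_alignment : Prop := ∀ (indel_penalty : Int) (PAM250 : List (String × List (String × Int))) (score_matrix : List (Int × Int × Int)) (v : String) (w : String) (i : Int) (j : Int) (new_v : String) (new_w : String), Dom_find_alignment indel_penalty PAM250 score_matrix v w i j new_v new_w → Pre_find_alignment indel_penalty PAM250 score_matrix v w i j new_v new_w → Spec_find_alignment indel_penalty PAM250 score_matrix v w i j new_v new_w (find_alignment indel_penalty PAM250 score_matrix v w i j new_v new_w)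

-- ===== LEMMAS AND PROOFS =====

lemma pvTrail_head (fuel : Nat) (p : Int) (sm : List (Int × Int × Int)) (i j : Int) :
    (pvTrail fuel p sm i j).head? = some (i, j) := by
  cases fuel with
  | zero => rfl
  | succ f => unfold pvTrail; split_ifs <;> rfl

lemma pvCols_snoc (v w : String) :
    ∀ (l : List (Int × Int)) (q c : Int × Int), l.getLast? = some q →
      pvCols v w (l ++ [c]) = pvCols v w l ++ [pvColumn v w c q] := by
  intro l
  induction l with
  | nil => intro q c h; simp at h
  | cons a t ih =>
    intro q c h
    cases t with
    | nil => simp at h; subst h; simp [pvCols]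
    | cons b t' =>
      have h' : (b :: t').getLast? = some q := by
        simpa [List.getLast?_cons_cons] using h
      have hrec := ih q c h'
      simp only [List.cons_append] at hrec ⊢
      simp [pvCols, hrec]

lemma pvColumn_up (v w : String) (i j : Int) :
    pvColumn v w (i, j) (i - 1, j) = (pvCh v i, '-') := by
  simp [pvColumn, show i - 1 ≠ i by omega]

lemma pvColumn_left (v w : String) (i j : Int) :
    pvColumn v w (i, j) (i, j - 1) = ('-', pvCh w j) := by
  simp [pvColumn]

lemma pvColumn_diag (v w : String) (i j : Int) :
    pvColumn v w (i, j) (i - 1, j - 1) = (pvCh v i, pvCh w j) := by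
  simp [pvColumn, show i - 1 ≠ i by omega]

-- the bridge: A's accumulator recursion computes exactly the columns of B's trail
lemma pvGoA_eq_cols (p : Int) (sm : List (Int × Int × Int)) (v w : String) :
    ∀ (fuel : Nat) (i j : Int) (nv nw : List Char),
      pvGoA fuel p sm v w i j nv nw =
        ((pvCols v w (pvTrail fuel p sm i j).reverse).map Prod.fst ++ nv,
         (pvCols v w (pvTrail fuel p sm i j).reverse).map Prod.snd ++ nw) := by
  intro fuel
  induction fuel with
  | zero => intro i j nv nw; simp [pvGoA, pvTrail, pvCols]
  | succ f ih =>
    intro i j nv nw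
    unfold pvGoA pvTrail
    by_cases h1 : (i = 0 ∧ j = 0) ∨ pvLkD sm i j = 0
    · simp [h1, pvCols]
    · simp only [if_neg h1]
      have snoc : ∀ (i' j' : Int),
          pvCols v w ((pvTrail f p sm i' j').reverse ++ [(i, j)])
            = pvCols v w (pvTrail f p sm i' j').reverse ++ [pvColumn v w (i, j) (i', j')] := by
        intro i' j'
        have hl : (pvTrail f p sm i' j').reverse.getLast? = some (i', j') := by
          rw [List.getLast?_reverse]; exact pvTrail_head f p sm i' j'
        exact pvCols_snoc v w (pvTrail f p sm i' j').reverse (i', j') (i, j) hl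
      split_ifs with h2 h3 h4 h5 <;>
        rw [ih] <;>
        simp [snoc, pvColumn_up, pvColumn_left, pvColumn_diag]

-- ===== VERDICT (by name: the statement is the Claim_ definition above) =====
theorem find_alignment_spec : Claim_equal_find_alignment := by
  intro p PAM sm v w i j nv nw _ _
  unfold Spec_find_alignment find_alignment find_alignment_alt
  simp [pvGoA_eq_cols]
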